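-- pv_equiv track=rewrite | github.com/Gasol-J/python | cmt103coursework_17.py | get_dic
-- ===== SOURCE A (Python) =====
-- def get_dic(words):
--     '''
--     Input: a list of words
--     Return: a dic of ly-words and its number of occurrences
--     '''
--     lywordlist=[]
--     b='ly'
--     for item in words:
--         if item[-2:]==b:
--             lywordlist.append(item)
--
--     dic ={}
--     for i in lywordlist:
--         if lywordlist.count(i)>=1:
--             dic[i]=lywordlist.count(i)
--
--     return dic
-- ===== SOURCE B (Python) =====
-- def get_dic(words):
--     '''
--     Input: a list of words
--     Return: a dic of ly-words and its number of occurrences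
--     '''
--     lywords = [item for item in words if item[-2:] == 'ly']
--
--     def group(lst):
--         # head word's count = how much the list shrinks when it is filtered out
--         if not lst:
--             return {}
--         w = lst[0]
--         rest = [x for x in lst[1:] if x != w]
--         dic = {w: len(lst) - len(rest)}
--         dic.update(group(rest))
--         return dic
--
--     return group(lywords)
-- ===== Notes on version B (the rewrite author's own statement) =====
-- stated objective: alternative
-- what changed: Replaced A's filter-then-repeated-.count loop (a full .count scan per list element) with a recursive partition: each step takes the first remaining ly-word, derives its count from how much the list shrinks when that word is filtered out, and recurses on the shrunken remainder.
import Mathlib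
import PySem

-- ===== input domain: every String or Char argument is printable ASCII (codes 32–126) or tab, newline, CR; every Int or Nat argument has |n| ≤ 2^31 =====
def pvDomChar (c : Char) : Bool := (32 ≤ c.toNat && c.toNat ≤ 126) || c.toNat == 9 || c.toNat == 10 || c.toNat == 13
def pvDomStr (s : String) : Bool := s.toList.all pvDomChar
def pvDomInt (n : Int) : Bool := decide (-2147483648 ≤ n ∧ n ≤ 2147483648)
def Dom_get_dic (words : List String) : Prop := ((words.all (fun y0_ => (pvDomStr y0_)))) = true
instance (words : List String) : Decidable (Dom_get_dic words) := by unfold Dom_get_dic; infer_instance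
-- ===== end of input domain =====

-- B replaces A's filter + repeated list.count scans with a recursive partition: the first remaining ly-word's
-- count is the length drop when it is filtered out, then recurse on the remainder (alternative decomposition).


-- ===== PORT A =====
-- item[-2:] == 'ly'  (the identical predicate appears in both Pythons)
def endsLy (item : String) : Bool :=
  PySem.Chars.slice item.toList (some (-2)) none == "ly".toList

def get_dic (words : List String) : List (String × Int) :=
  let lywordlist : List String :=
    words.foldl (fun acc item => if endsLy item then acc ++ [item] else acc) []
  let dic : PySem.Dict String Int :=
    lywordlist.foldl
      (fun d i =>
        if (lywordlist.count i : Int) ≥ 1 then d.insert i (lywordlist.count i : Int) else d)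
      PySem.Dict.empty
  dic.items

-- ===== PORT B =====
-- the inner recursive 'group' of Source B
def groupLy : List String → PySem.Dict String Int
  | [] => PySem.Dict.empty
  | w :: t =>
    PySem.Dict.update
      (PySem.Dict.empty.insert w (((w :: t).length : Int) - ((t.filter (fun x => x != w)).length : Int)))
      (groupLy (t.filter (fun x => x != w))).items
termination_by l => l.length
decreasing_by
  have h := List.length_filter_le (fun x => x != w) t
  simp at *
  omega

def get_dic_alt (words : List String) : List (String × Int) :=
  (groupLy (words.filter (fun item => endsLy item))).items

-- ===== PRECONDITION & SPEC =====
def Spec_get_dic (words : List String) (out : List (String × Int)) : Prop := out = get_dic_alt words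
instance (words : List String) (out : List (String × Int)) : Decidable (Spec_get_dic words out) := by unfold Spec_get_dic; infer_instance

-- ===== CLAIM (what is proved, stated in full; the proofs are below) =====
def Claim_equal_get_dic : Prop := ∀ (words : List String), Dom_get_dic words → Spec_get_dic words (get_dic words)

-- ===== LEMMAS AND PROOFS =====

-- elements already in the accumulator can be filtered out of a Set.add fold
theorem foldl_add_filter (w : String) (l : List String) (s : PySem.Set String) (h : w ∈ s) :
    l.foldl PySem.Set.add s = (l.filter (fun x => x != w)).foldl PySem.Set.add s := by
  induction l generalizing s with
  | nil => rfl
  | cons x t ih =>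
    by_cases hx : x = w
    · subst hx
      have hadd : PySem.Set.add s x = s := by
        simp [PySem.Set.add, PySem.Set.contains, h]
      simp [hadd, ih s h]
    · have hne : (x != w) = true := by simp [hx]
      simp only [List.foldl_cons, List.filter_cons, hne, if_pos]
      exact ih _ ((PySem.Set.mem_add s x w).mpr (Or.inl h))

-- a Set.add fold over elements all ≠ w commutes with a leading w
theorem foldl_add_cons_head (w : String) (l : List String) (s : PySem.Set String)
    (hw : ∀ x ∈ l, x ≠ w) :
    l.foldl PySem.Set.add (w :: s) = w :: l.foldl PySem.Set.add s := by
  induction l generalizing s with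
  | nil => rfl
  | cons x t ih =>
    simp only [List.foldl_cons]
    have hxw : x ≠ w := hw x (List.mem_cons_self ..)
    have hc : PySem.Set.add (w :: s) x = w :: PySem.Set.add s x := by
      simp only [PySem.Set.add, PySem.Set.contains, List.contains_iff_mem, List.mem_cons]
      by_cases hm : x ∈ s <;> simp [hm, hxw]
    rw [hc]
    exact ih _ (fun y hy => hw y (List.mem_cons_of_mem _ hy))

-- Set.ofList peels its head by filtering the head out of the tail
theorem ofList_cons_filter (w : String) (t : List String) :
    PySem.Set.ofList (w :: t) = w :: PySem.Set.ofList (t.filter (fun x => x != w)) := by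
  have h1 : PySem.Set.ofList (w :: t) = t.foldl PySem.Set.add [w] := by
    rw [PySem.Set.ofList_eq_foldl, List.foldl_cons]
    congr 1
  rw [h1, foldl_add_filter w t [w] (by simp)]
  rw [foldl_add_cons_head w _ []
    (by intro x hx; simpa using ((List.mem_filter.mp hx).2))]
  rw [PySem.Set.ofList_eq_foldl]

-- the multiplicity of the head is the length drop when it is filtered out
theorem count_eq_length_sub (w : String) (t : List String) :
    t.count w + (t.filter (fun x => x != w)).length = t.length := by
  rw [List.count, ← List.countP_eq_length_filter]
  have := List.length_eq_countP_add_countP (fun x => x == w) (l := t)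
  rw [this]
  congr 1
  apply List.countP_congr
  intro x _
  simp

-- B's recursive grouping produces exactly first-occurrence keys with total counts
theorem items_groupLy_le (n : Nat) : ∀ (L : List String), L.length ≤ n →
    (groupLy L).items
      = (PySem.Set.ofList L).map (fun k => (k, (L.count k : Int))) := by
  induction n with
  | zero =>
    intro L hL
    have : L = [] := List.length_eq_zero_iff.mp (Nat.le_zero.mp hL)
    subst this
    simp [groupLy]
    rfl
  | succ n ih =>
    intro L hL
    match L with
    | [] => simp [groupLy]; rfl
    | w :: t =>
      rw [groupLy]
      have hrest : (t.filter (fun x => x != w)).length ≤ n := by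
        have := List.length_filter_le (fun x => x != w) t
        simp at hL
        omega
      have ihr := ih _ hrest
      -- d.update ps is ps.foldl insert d (definitional); the inserted keys are fresh, so items append
      show ((groupLy (t.filter (fun x => x != w))).items.foldl (fun acc p => acc.insert p.1 p.2)
              (PySem.Dict.empty.insert w (((w :: t).length : Int) - ((t.filter (fun x => x != w)).length : Int)))).items
            = _
      have hfresh : ∀ p ∈ (groupLy (t.filter (fun x => x != w))).items,
          (PySem.Dict.empty.insert w (((w :: t).length : Int) - ((t.filter (fun x => x != w)).length : Int))).contains p.1 = false := by
        intro p hp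
        rw [ihr] at hp
        obtain ⟨k, hk, rfl⟩ := List.mem_map.mp hp
        have hkmem : k ∈ t.filter (fun x => x != w) := (PySem.Set.mem_ofList _ _).mp hk
        have hkw : k ≠ w := by simpa using (List.mem_filter.mp hkmem).2
        rw [PySem.Dict.contains_insert, PySem.Dict.contains_empty]
        simp [hkw]
      have hnodup : ((groupLy (t.filter (fun x => x != w))).items.map Prod.fst).Nodup := by
        have hid : (Prod.fst ∘ fun k : String => (k, ((t.filter (fun x => x != w)).count k : Int))) = id := rfl
        rw [ihr, List.map_map, hid, List.map_id]
        exact PySem.Set.nodup_ofList _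
      rw [PySem.Dict.items_foldl_insert_fresh _ Prod.fst Prod.snd _ hfresh hnodup]
      rw [PySem.Dict.items_insert_of_not_contains _ _ (PySem.Dict.contains_empty w)]
      rw [ofList_cons_filter, List.map_cons]
      have hcnt := count_eq_length_sub w t
      have hhead : ((w :: t).length : Int) - ((t.filter (fun x => x != w)).length : Int)
          = ((w :: t).count w : Int) := by
        rw [List.count_cons_self]
        simp only [List.length_cons]
        push_cast
        omega
      rw [ihr]
      simp only [List.map_map]
      have htail : (PySem.Set.ofList (t.filter (fun x => x != w))).map
            (fun k => (k, ((t.filter (fun x => x != w)).count k : Int)))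
          = (PySem.Set.ofList (t.filter (fun x => x != w))).map
            (fun k => (k, ((w :: t).count k : Int))) := by
        apply List.map_congr_left
        intro k hk
        have hkmem : k ∈ t.filter (fun x => x != w) := (PySem.Set.mem_ofList _ _).mp hk
        have hkw : k ≠ w := by simpa using (List.mem_filter.mp hkmem).2
        rw [List.count_filter (by simp [hkw]), List.count_cons_of_ne (Ne.symm hkw)]
      rw [← htail, hhead]
      have hempty : (PySem.Dict.empty : PySem.Dict String Int).items = [] := rfl
      rw [hempty]
      simp

theorem items_groupLy (L : List String) :
    (groupLy L).items
      = (PySem.Set.ofList L).map (fun k => (k, (L.count k : Int))) :=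
  items_groupLy_le L.length L (le_refl _)

-- getD after a fold inserting a value depending only on the key
theorem getD_foldl_insert_const (v : String → Int) (L : List String)
    (d : PySem.Dict String Int) (k : String) (dflt : Int) :
    (L.foldl (fun d i => d.insert i (v i)) d).getD k dflt
      = if k ∈ L then v k else d.getD k dflt := by
  induction L generalizing d with
  | nil => simp
  | cons x t ih =>
    simp only [List.foldl_cons, ih, List.mem_cons]
    rw [PySem.Dict.getD_insert]
    split_ifs with h1 h2 h3 <;> simp_all

-- A's result: first-occurrence ly-words, each with its total count
theorem get_dic_eq_items (words : List String) :
    get_dic words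
      = (PySem.Set.ofList (words.filter endsLy)).map
          (fun k => (k, ((words.filter endsLy).count k : Int))) := by
  unfold get_dic
  rw [PySem.List.foldl_append_if_eq_filter]
  simp only [List.nil_append]
  set L := words.filter endsLy with hL
  have hcong : L.foldl
      (fun d i => if (L.count i : Int) ≥ 1 then d.insert i (L.count i : Int) else d)
      PySem.Dict.empty
      = L.foldl (fun d i => d.insert i (L.count i : Int)) PySem.Dict.empty := by
    apply PySem.List.foldl_congr_mem
    intro acc x hx
    have : 1 ≤ L.count x := List.one_le_count_iff.mpr hx
    simp only [ge_iff_le]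
    rw [if_pos (by exact_mod_cast this)]
  rw [hcong]
  have hnodup : (L.foldl (fun d i => d.insert i (L.count i : Int)) PySem.Dict.empty).keys.Nodup :=
    PySem.Dict.nodup_keys_foldl_insert L _ _ (by simp)
  rw [PySem.Dict.items_eq_map_keys _ hnodup 0]
  have hkeys : (L.foldl (fun d i => d.insert i (L.count i : Int)) PySem.Dict.empty).keys
      = PySem.Set.ofList L := by
    rw [PySem.Dict.keys_foldl_insert]
    exact PySem.Set.update_nil_left L
  rw [hkeys]
  apply List.map_congr_left
  intro k hk
  have hkL : k ∈ L := (PySem.Set.mem_ofList L k).mp hk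
  rw [getD_foldl_insert_const, if_pos hkL]

-- ===== VERDICT (by name: the statement is the Claim_ definition above) =====
theorem get_dic_spec : Claim_equal_get_dic := by
  intro words _
  unfold Spec_get_dic
  unfold get_dic_alt
  rw [get_dic_eq_items, items_groupLy]
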